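-- pv_equiv track=rewrite | github.com/Awokens/CollegeWork | CS202/Module2/PopulationData/avgpopulationcalc.py | findYearWithMinIncrease
-- ===== SOURCE A (Python) =====
-- def findYearWithMinIncrease(populationData):
--     minIncrease = float('inf')
--     minIncreaseYear = 0
--     for i in range(1, len(populationData)):
--         increase = populationData[i] - populationData[i-1]
--         if increase < minIncrease:
--             minIncrease = increase
--             minIncreaseYear = i + 1950
--     return minIncreaseYear
-- ===== SOURCE B (Python) =====
-- def findYearWithMinIncrease(populationData):
--     # Sort the candidate indices by their increase; the stable sort keeps the
--     # earliest index first among ties, so the head is the first minimum.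
--     order = sorted(range(1, len(populationData)),
--                    key=lambda i: populationData[i] - populationData[i - 1])
--     return order[0] + 1950 if order else 0
-- ===== Notes on version B (the rewrite author's own statement) =====
-- stated objective: alternative
-- what changed: B replaces A's single stateful running-minimum loop by sorting the index range stably by increase and taking the head of the sorted list (stability preserves the first-minimum tie-break).
import Mathlib
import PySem

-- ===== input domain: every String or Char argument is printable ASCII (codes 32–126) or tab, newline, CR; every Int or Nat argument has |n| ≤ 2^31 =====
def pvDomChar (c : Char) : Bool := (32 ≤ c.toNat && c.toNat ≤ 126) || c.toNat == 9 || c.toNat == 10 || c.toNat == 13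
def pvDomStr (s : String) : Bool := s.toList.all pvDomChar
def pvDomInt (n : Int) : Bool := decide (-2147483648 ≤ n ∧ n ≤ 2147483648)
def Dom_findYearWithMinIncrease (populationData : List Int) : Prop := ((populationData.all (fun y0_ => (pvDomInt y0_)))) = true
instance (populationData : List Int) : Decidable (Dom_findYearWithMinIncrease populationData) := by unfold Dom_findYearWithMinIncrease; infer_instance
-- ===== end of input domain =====

-- B re-implements A's running-minimum scan as a stable sort of the index range by
-- increase followed by taking the head; stability preserves the first-minimum tie-break.


-- ===== PORT A =====
-- State is (minIncrease, minIncreaseYear); minIncrease = float('inf') is encoded as `none`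
-- (every Int compares < inf, exactly the `none` branch). Indices in range(1, len) are always
-- valid, so xs[i] is ported total as pyGetD.
def pvStepA (populationData : List Int) (st : Option Int × Int) (i : Int) : Option Int × Int :=
  let increase := PySem.List.pyGetD populationData i 0 - PySem.List.pyGetD populationData (i - 1) 0
  match st.1 with
  | none => (some increase, i + 1950)
  | some m => if increase < m then (some increase, i + 1950) else st

def findYearWithMinIncrease (populationData : List Int) : Int :=
  ((PySem.List.pyRange 1 (PySem.List.len populationData) 1).foldl
    (pvStepA populationData) (none, 0)).2

-- ===== PORT B =====
-- key=lambda i: populationData[i] - populationData[i-1]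
def pvKey (populationData : List Int) (i : Int) : Int :=
  PySem.List.pyGetD populationData i 0 - PySem.List.pyGetD populationData (i - 1) 0

-- order = sorted(range(1, len(populationData)), key=...); order[0] + 1950 if order else 0
def findYearWithMinIncrease_alt (populationData : List Int) : Int :=
  match PySem.List.sorted (PySem.List.pyRange 1 (PySem.List.len populationData) 1)
      (pvKey populationData) false with
  | [] => 0
  | i :: _ => i + 1950

-- ===== PRECONDITION & SPEC =====
def Spec_findYearWithMinIncrease (populationData : List Int) (out : Int) : Prop := out = findYearWithMinIncrease_alt populationData
instance (populationData : List Int) (out : Int) : Decidable (Spec_findYearWithMinIncrease populationData out) := by unfold Spec_findYearWithMinIncrease; infer_instance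

-- ===== CLAIM (what is proved, stated in full; the proofs are below) =====
def Claim_equal_findYearWithMinIncrease : Prop := ∀ (populationData : List Int), Dom_findYearWithMinIncrease populationData → Spec_findYearWithMinIncrease populationData (findYearWithMinIncrease populationData)

-- ===== LEMMAS AND PROOFS =====

-- The step of PySem.List.min?'s fold, named for the proofs below.
def pvMinStep (key : Int → Int) (acc : Option Int) (x : Int) : Option Int :=
  match acc with
  | none => some x
  | some m => if key x < key m then some x else some m

-- Head of a stable insertion is the running-min step on heads.
lemma pvHead_insertBy (before : Int → Int → Bool) (x : Int) (acc : List Int) :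
    (PySem.List.insertBy before x acc).head? =
      match acc.head? with
      | none => some x
      | some m => if before x m then some x else some m := by
  cases acc with
  | nil => rfl
  | cons y ys =>
    simp only [PySem.List.insertBy, List.head?_cons]
    split_ifs <;> simp_all

-- Head of the insertion-sort fold is a running-min fold over heads.
lemma pvHead_foldl_insertBy (before : Int → Int → Bool) :
    ∀ (xs : List Int) (acc : List Int),
      (xs.foldl (fun a x => PySem.List.insertBy before x a) acc).head? =
        xs.foldl (fun o x => match o with
          | none => some x
          | some m => if before x m then some x else some m) acc.head? := by
  intro xs
  induction xs with
  | nil => intro acc; rfl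
  | cons x tl ih =>
    intro acc
    simp only [List.foldl_cons]
    rw [ih, pvHead_insertBy]

-- Therefore head of the stable sort is min? (the FIRST extremal element).
lemma pvHead_sorted (xs : List Int) (key : Int → Int) :
    (PySem.List.sorted xs key false).head? = PySem.List.min? xs key := by
  show (xs.foldl (fun a x =>
      PySem.List.insertBy (fun a b => decide (key a < key b)) x a) []).head? =
    PySem.List.min? xs key
  rw [pvHead_foldl_insertBy (fun a b => decide (key a < key b)) xs []]
  simp only [PySem.List.min?, List.head?_nil]
  congr 1
  funext acc x
  cases acc with
  | none => rfl
  | some m => by_cases h : key x < key m <;> simp [h]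

-- A's loop state tracked against the running-min fold.
def pvRel (key : Int → Int) (st : Option Int × Int) (acc : Option Int) : Prop :=
  (st = (none, 0) ∧ acc = none) ∨ (∃ j, acc = some j ∧ st.1 = some (key j) ∧ st.2 = j + 1950)

lemma pvFoldRel (populationData : List Int) :
    ∀ (is : List Int) (st : Option Int × Int) (acc : Option Int),
      pvRel (pvKey populationData) st acc →
      pvRel (pvKey populationData) (is.foldl (pvStepA populationData) st)
        (is.foldl (pvMinStep (pvKey populationData)) acc) := by
  intro is
  induction is with
  | nil => intro st acc h; simpa using h
  | cons i tl ih =>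
    intro st acc h
    simp only [List.foldl_cons]
    apply ih
    rcases h with ⟨h1, h2⟩ | ⟨j, hacc, hst1, hst2⟩
    · subst h1; subst h2
      exact Or.inr ⟨i, rfl, rfl, rfl⟩
    · rw [hacc]
      rcases st with ⟨st1, st2⟩
      simp only at hst1 hst2; subst hst1; subst hst2
      by_cases hlt : PySem.List.pyGetD populationData i 0 - PySem.List.pyGetD populationData (i - 1) 0 <
          PySem.List.pyGetD populationData j 0 - PySem.List.pyGetD populationData (j - 1) 0
      · refine Or.inr ⟨i, ?_, ?_, ?_⟩
        · simp [pvMinStep, pvKey, hlt]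
        · simp [pvStepA, pvKey, hlt]
        · simp [pvStepA, pvKey, hlt]
      · refine Or.inr ⟨j, ?_, ?_, ?_⟩
        · simp [pvMinStep, pvKey, hlt]
        · simp [pvStepA, pvKey, hlt]
        · simp [pvStepA, pvKey, hlt]

-- ===== VERDICT (by name: the statement is the Claim_ definition above) =====
theorem findYearWithMinIncrease_spec : Claim_equal_findYearWithMinIncrease := by
  intro pd _
  unfold Spec_findYearWithMinIncrease findYearWithMinIncrease findYearWithMinIncrease_alt
  have hrel := pvFoldRel pd (PySem.List.pyRange 1 (PySem.List.len pd) 1)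
    (none, 0) none (Or.inl ⟨rfl, rfl⟩)
  have hmin : (PySem.List.pyRange 1 (PySem.List.len pd) 1).foldl
      (pvMinStep (pvKey pd)) none = PySem.List.min? (PySem.List.pyRange 1 (PySem.List.len pd) 1) (pvKey pd) := by
    simp only [PySem.List.min?]
    congr 1
    funext acc x
    cases acc <;> rfl
  rw [hmin] at hrel
  have hhead := pvHead_sorted (PySem.List.pyRange 1 (PySem.List.len pd) 1) (pvKey pd)
  rcases hrel with ⟨h1, h2⟩ | ⟨j, hacc, hst1, hst2⟩
  · rw [h1]
    rw [h2] at hhead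
    cases hs : PySem.List.sorted (PySem.List.pyRange 1 (PySem.List.len pd) 1) (pvKey pd) false with
    | nil => rfl
    | cons i t => rw [hs] at hhead; simp at hhead
  · rw [hst2]
    rw [hacc] at hhead
    cases hs : PySem.List.sorted (PySem.List.pyRange 1 (PySem.List.len pd) 1) (pvKey pd) false with
    | nil => rw [hs] at hhead; simp at hhead
    | cons i t => rw [hs] at hhead; simp at hhead; rw [hhead]
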